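-- pv_equiv track=rewrite | github.com/tsreekrishna/library | crop_classification/src/data_preprocess.py | generate_label_set_map
-- ===== SOURCE A (Python) =====
-- from itertools import combinations
--
-- def generate_label_set_map(label_map):
--     set_map = {}
--     for i in range(1,len(label_map)+1):
--         for comb in combinations(label_map.keys(), i):
--             key_comb = ''
--             value_comb = ''
--             for items in comb:
--                 key_comb =  key_comb + ' ' + items
--                 value_comb =  value_comb + ' ' + label_map[items]
--             key_comb, value_comb = key_comb.lstrip(), value_comb.lstrip()
--             set_map[key_comb] = value_comb
--     return set_map
-- ===== SOURCE B (Python) =====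
-- def generate_label_set_map(label_map):
--     items = list(label_map.items())
--     out = {}
--     level = [(k, v, items[j+1:]) for j, (k, v) in enumerate(items)]
--     while level:
--         nxt = []
--         for ks, vs, rest in level:
--             out[ks.lstrip()] = vs.lstrip()
--             nxt += [(ks + ' ' + k2, vs + ' ' + v2, rest[t+1:]) for t, (k2, v2) in enumerate(rest)]
--         level = nxt
--     return out
-- ===== Notes on version B (the rewrite author's own statement) =====
-- stated objective: alternative
-- what changed: B replaces the size-grouped itertools.combinations enumeration (which rebuilds every subset's joined key/value strings element by element) with a level-wise breadth-first expansion of subsets, where each subset's joined strings and remaining-items suffix are extended in one step from its parent subset.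
import Mathlib
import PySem

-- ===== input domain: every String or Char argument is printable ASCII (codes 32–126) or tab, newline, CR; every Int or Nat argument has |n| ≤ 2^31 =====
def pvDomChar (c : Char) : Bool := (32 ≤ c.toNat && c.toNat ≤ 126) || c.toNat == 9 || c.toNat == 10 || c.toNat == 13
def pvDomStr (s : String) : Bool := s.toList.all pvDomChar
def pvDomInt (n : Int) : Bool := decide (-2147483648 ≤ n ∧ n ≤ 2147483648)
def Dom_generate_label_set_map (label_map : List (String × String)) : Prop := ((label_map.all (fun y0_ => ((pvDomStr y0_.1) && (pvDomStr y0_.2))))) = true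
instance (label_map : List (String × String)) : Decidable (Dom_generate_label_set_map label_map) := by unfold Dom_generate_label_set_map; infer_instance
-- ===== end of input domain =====

-- B replaces the size-grouped itertools.combinations enumeration by a level-wise
-- breadth-first expansion of subsets that extends each subset's joined key/value
-- strings from its parent instead of rebuilding them element by element.

-- ===== PORT A =====
def generate_label_set_map (label_map : List (String × String)) : List (String × String) :=
  let d := PySem.Dict.ofList label_map
  let set_map :=
    (PySem.List.pyRange 1 ((d.size : Int) + 1) 1).foldl (fun set_map i =>
      (PySem.List.combinations d.keys i.toNat).foldl (fun set_map comb =>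
        let kv := comb.foldl
          (fun (acc : String × String) items =>
            (acc.1 ++ " " ++ items, acc.2 ++ " " ++ d.getD items ""))
          ("", "")
        set_map.insert (PySem.Str.lstrip kv.1) (PySem.Str.lstrip kv.2))
        set_map)
      PySem.Dict.empty
  set_map.items

-- ===== PORT B =====
-- the 'while level:' loop of Source B; it runs at most items.length rounds (each round
-- handles the subsets of one size), so that fuel makes the same computation total
def altLoop (out : PySem.Dict String String)
    (level : List (String × String × List (String × String))) (fuel : Nat) :
    PySem.Dict String String :=
  match fuel with
  | 0 => out
  | fuel + 1 =>
    if level.isEmpty then out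
    else
      let step := level.foldl
        (fun (acc : PySem.Dict String String × List (String × String × List (String × String))) e =>
          (acc.1.insert (PySem.Str.lstrip e.1) (PySem.Str.lstrip e.2.1),
           acc.2 ++ (PySem.List.enumerate e.2.2 0).map (fun te =>
             (e.1 ++ " " ++ te.2.1, e.2.1 ++ " " ++ te.2.2,
              PySem.List.slice e.2.2 (some (te.1 + 1)) none))))
        (out, [])
      altLoop step.1 step.2 fuel

def generate_label_set_map_alt (label_map : List (String × String)) : List (String × String) :=
  let items := (PySem.Dict.ofList label_map).items
  let level := (PySem.List.enumerate items 0).map (fun je =>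
    (je.2.1, je.2.2, PySem.List.slice items (some (je.1 + 1)) none))
  (altLoop PySem.Dict.empty level items.length).items

-- ===== PRECONDITION & SPEC =====
def Spec_generate_label_set_map (label_map : List (String × String)) (out : List (String × String)) : Prop := out = generate_label_set_map_alt label_map
instance (label_map : List (String × String)) (out : List (String × String)) : Decidable (Spec_generate_label_set_map label_map out) := by unfold Spec_generate_label_set_map; infer_instance

-- ===== CLAIM (what is proved, stated in full; the proofs are below) =====
def Claim_equal_generate_label_set_map : Prop := ∀ (label_map : List (String × String)), Dom_generate_label_set_map label_map → Spec_generate_label_set_map label_map (generate_label_set_map label_map)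

-- ===== LEMMAS AND PROOFS =====

-- expansion of a list into (element, suffix after it) pairs
def pvExpand {α : Type} : List α → List (α × List α)
  | [] => []
  | x :: xs => (x, xs) :: pvExpand xs

-- combinations together with the suffix after the last chosen element
def pvCombR {α : Type} : List α → Nat → List (List α × List α)
  | xs, 0 => [([], xs)]
  | [], _ + 1 => []
  | x :: xs, r + 1 =>
      (pvCombR xs r).map (fun p => (x :: p.1, p.2)) ++ pvCombR xs (r + 1)

-- abbreviations used by the proofs
def pvJ (l : List String) : String := PySem.Str.join " " l

def pvPairB (c : List (String × String)) : String × String :=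
  (PySem.Str.lstrip (pvJ (c.map (·.1))), PySem.Str.lstrip (pvJ (c.map (·.2))))

def pvProj (p : List (String × String) × List (String × String)) :
    String × String × List (String × String) :=
  (pvJ (p.1.map (·.1)), pvJ (p.1.map (·.2)), p.2)

def pvInsA (d : PySem.Dict String String) (l : List (String × String)) :
    PySem.Dict String String :=
  l.foldl (fun d p => d.insert p.1 p.2) d

theorem pvCombR_fst {α : Type} (xs : List α) (r : Nat) :
    (pvCombR xs r).map (·.1) = PySem.List.combinations xs r := by
  induction xs generalizing r with
  | nil => cases r <;> simp [pvCombR, PySem.List.combinations_zero, PySem.List.combinations_nil_succ]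
  | cons x xs ih =>
      cases r with
      | zero => simp [pvCombR, PySem.List.combinations_zero]
      | succ r =>
          simp [pvCombR, PySem.List.combinations_cons_succ, ← ih, List.map_map]

theorem pvCombR_one {α : Type} (xs : List α) :
    pvCombR xs 1 = (pvExpand xs).map (fun q => ([q.1], q.2)) := by
  induction xs with
  | nil => simp [pvCombR, pvExpand]
  | cons x xs ih => simp [pvCombR, pvExpand, ih]

theorem pvCombR_succ {α : Type} (xs : List α) (r : Nat) :
    pvCombR xs (r + 1) =
      (pvCombR xs r).flatMap (fun p => (pvExpand p.2).map (fun q => (p.1 ++ [q.1], q.2))) := by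
  induction xs generalizing r with
  | nil => cases r <;> simp [pvCombR, pvExpand]
  | cons x xs ih =>
      cases r with
      | zero =>
          simp [pvCombR, pvExpand, pvCombR_one]
      | succ r =>
          rw [show pvCombR (x :: xs) (r + 1 + 1) =
                (pvCombR xs (r + 1)).map (fun p => (x :: p.1, p.2)) ++ pvCombR xs (r + 1 + 1) from rfl]
          rw [show pvCombR (x :: xs) (r + 1) =
                (pvCombR xs r).map (fun p => (x :: p.1, p.2)) ++ pvCombR xs (r + 1) from rfl]
          rw [List.flatMap_append, List.flatMap_map, ← ih (r + 1), ih r, List.map_flatMap]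
          simp [List.map_map, Function.comp_def]

theorem pvCombR_length {α : Type} {xs : List α} {r : Nat} {p : List α × List α}
    (hp : p ∈ pvCombR xs r) : p.1.length = r := by
  have h1 : p.1 ∈ (pvCombR xs r).map (·.1) := List.mem_map_of_mem hp
  rw [pvCombR_fst] at h1
  exact ((PySem.List.mem_combinations_iff _ _ _).1 h1).2

theorem pvCombR_ne_nil {α : Type} {xs : List α} {r : Nat} (h : r ≤ xs.length) :
    pvCombR xs r ≠ [] := by
  induction xs generalizing r with
  | nil =>
      have : r = 0 := by simpa using h
      subst this; simp [pvCombR]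
  | cons x xs ih =>
      cases r with
      | zero => simp [pvCombR]
      | succ r =>
          have hr : r ≤ xs.length := by simpa using h
          have hne := ih hr
          simp only [pvCombR, ne_eq]
          intro hcontra
          rcases List.append_eq_nil_iff.mp hcontra with ⟨h1, _⟩
          exact hne (List.map_eq_nil_iff.mp h1)

theorem pvMem_combinations_mem {α : Type} {xs c : List α} {r : Nat}
    (hc : c ∈ PySem.List.combinations xs r) {x : α} (hx : x ∈ c) : x ∈ xs :=
  ((PySem.List.mem_combinations_iff _ _ _).1 hc).1.mem hx

-- String-level join facts
theorem pvJ_singleton (x : String) : pvJ [x] = x := by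
  apply String.toList_inj.mp
  simp [pvJ, PySem.Str.toList_join, PySem.Chars.join, List.intercalate]

theorem pvJ_cons_cons (x y : String) (t : List String) :
    pvJ (x :: y :: t) = x ++ " " ++ pvJ (y :: t) := by
  apply String.toList_inj.mp
  simp only [pvJ, PySem.Str.toList_join, PySem.Chars.join, String.toList_append]
  simp [List.intercalate]

theorem pvFoldl_join (l : List String) (hl : l ≠ []) (a : String) :
    l.foldl (fun acc s => acc ++ " " ++ s) a = a ++ " " ++ pvJ l := by
  induction l generalizing a with
  | nil => exact absurd rfl hl
  | cons x xs ih =>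
      cases xs with
      | nil => simp [pvJ_singleton]
      | cons y t =>
          rw [List.foldl_cons, ih (by simp) (a ++ " " ++ x), pvJ_cons_cons]
          simp [String.append_assoc]

theorem pvJ_append_singleton (l : List String) (hl : l ≠ []) (x : String) :
    pvJ (l ++ [x]) = pvJ l ++ " " ++ x := by
  induction l with
  | nil => exact absurd rfl hl
  | cons y ys ih =>
      cases ys with
      | nil => simp [pvJ_cons_cons, pvJ_singleton]
      | cons z t =>
          have h1 : (y :: z :: t) ++ [x] = y :: ((z :: t) ++ [x]) := rfl
          have h2 : ((z :: t) ++ [x]) = z :: (t ++ [x]) := rfl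
          rw [h1, h2, pvJ_cons_cons, ← h2, ih (by simp), pvJ_cons_cons]
          simp [String.append_assoc]

theorem pvLstrip_space (s : String) :
    PySem.Str.lstrip (" " ++ s) = PySem.Str.lstrip s := by
  apply String.toList_inj.mp
  have h1 : (" " : String).toList = [' '] := rfl
  simp only [PySem.Str.toList_lstrip, String.toList_append, h1, PySem.Chars.lstrip,
    List.singleton_append]
  rw [List.dropWhile_cons_of_pos (by decide)]

theorem pvInsA_append (d : PySem.Dict String String) (s t : List (String × String)) :
    pvInsA d (s ++ t) = pvInsA (pvInsA d s) t := by
  simp [pvInsA, List.foldl_append]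

-- enumerate + slice is exactly pvExpand
theorem pvEnum_slice_aux {α : Type} :
    ∀ (xs pre : List α),
      (PySem.List.enumerate xs (pre.length : Int)).map
          (fun te => (te.2, PySem.List.slice (pre ++ xs) (some (te.1 + 1)) none)) =
        pvExpand xs := by
  intro xs
  induction xs with
  | nil => intro pre; simp [PySem.List.enumerate, pvExpand]
  | cons x xs ih =>
      intro pre
      have hcast : ((pre.length : Int) + 1) = ((pre ++ [x]).length : Int) := by simp
      have hslice : PySem.List.slice (pre ++ x :: xs) (some ((pre.length : Int) + 1)) none = xs := by
        rw [PySem.List.slice_from _ (by positivity)]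
        have hnat : ((pre.length : Int) + 1).toNat = (pre ++ [x]).length := by simp
        rw [hnat]
        rw [show pre ++ x :: xs = (pre ++ [x]) ++ xs by simp]
        exact List.drop_left
      simp only [PySem.List.enumerate, List.map_cons, pvExpand]
      congr 1
      · rw [hslice]
      · rw [hcast, show pre ++ x :: xs = (pre ++ [x]) ++ xs by simp]
        exact ih (pre ++ [x])

theorem pvEnum_slice_pair {α : Type} (xs : List α) :
    (PySem.List.enumerate xs 0).map
        (fun te => (te.2, PySem.List.slice xs (some (te.1 + 1)) none)) =
      pvExpand xs := by
  have := pvEnum_slice_aux xs []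
  simpa using this

-- the child comprehension of one level element, as a map over pvExpand
theorem pvChild_map (A B : String) (xs : List (String × String)) :
    (PySem.List.enumerate xs 0).map (fun te =>
        (A ++ " " ++ te.2.1, B ++ " " ++ te.2.2,
         PySem.List.slice xs (some (te.1 + 1)) none)) =
      (pvExpand xs).map (fun q => (A ++ " " ++ q.1.1, B ++ " " ++ q.1.2, q.2)) := by
  rw [show (fun te : Int × (String × String) =>
        (A ++ " " ++ te.2.1, B ++ " " ++ te.2.2,
         PySem.List.slice xs (some (te.1 + 1)) none)) =
      ((fun q : (String × String) × List (String × String) =>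
        (A ++ " " ++ q.1.1, B ++ " " ++ q.1.2, q.2)) ∘
       (fun te : Int × (String × String) =>
        (te.2, PySem.List.slice xs (some (te.1 + 1)) none))) from rfl]
  rw [← List.map_map, pvEnum_slice_pair]

-- the seed comprehension, as a map over pvExpand
theorem pvSeed_map (xs : List (String × String)) :
    (PySem.List.enumerate xs 0).map (fun je =>
        (je.2.1, je.2.2, PySem.List.slice xs (some (je.1 + 1)) none)) =
      (pvExpand xs).map (fun q => (q.1.1, q.1.2, q.2)) := by
  rw [show (fun je : Int × (String × String) =>
        (je.2.1, je.2.2, PySem.List.slice xs (some (je.1 + 1)) none)) =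
      ((fun q : (String × String) × List (String × String) => (q.1.1, q.1.2, q.2)) ∘
       (fun je : Int × (String × String) =>
        (je.2, PySem.List.slice xs (some (je.1 + 1)) none))) from rfl]
  rw [← List.map_map, pvEnum_slice_pair]

-- one round of B's foldl splits into its two accumulators
theorem pvRound (level : List (String × String × List (String × String))) :
    ∀ (out : PySem.Dict String String) (acc2 : List (String × String × List (String × String))),
      level.foldl
        (fun (acc : PySem.Dict String String × List (String × String × List (String × String))) e =>
          (acc.1.insert (PySem.Str.lstrip e.1) (PySem.Str.lstrip e.2.1),
           acc.2 ++ (PySem.List.enumerate e.2.2 0).map (fun te =>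
             (e.1 ++ " " ++ te.2.1, e.2.1 ++ " " ++ te.2.2,
              PySem.List.slice e.2.2 (some (te.1 + 1)) none)))) (out, acc2) =
      (level.foldl (fun d e => d.insert (PySem.Str.lstrip e.1) (PySem.Str.lstrip e.2.1)) out,
       level.foldl (fun l e => l ++ (PySem.List.enumerate e.2.2 0).map (fun te =>
             (e.1 ++ " " ++ te.2.1, e.2.1 ++ " " ++ te.2.2,
              PySem.List.slice e.2.2 (some (te.1 + 1)) none))) acc2) := by
  induction level with
  | nil => intro out acc2; rfl
  | cons e rest ih => intro out acc2; simp only [List.foldl_cons]; exact ih _ _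

-- the whole while loop of B
theorem pvAltLoop_eq (items : List (String × String)) :
    ∀ (f i : Nat) (out : PySem.Dict String String), 1 ≤ i → i + f = items.length + 1 →
      altLoop out ((pvCombR items i).map pvProj) f =
        pvInsA out ((List.range f).flatMap
          (fun t => (PySem.List.combinations items (i + t)).map pvPairB)) := by
  intro f
  induction f with
  | zero => intro i out _ _; simp [altLoop, pvInsA]
  | succ f ih =>
      intro i out hi hif
      have hne : pvCombR items i ≠ [] := pvCombR_ne_nil (by omega)
      have hlev : (((pvCombR items i).map pvProj).isEmpty) = false := by
        simp only [List.isEmpty_eq_false_iff, ne_eq, List.map_eq_nil_iff]; exact hne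
      simp only [altLoop, hlev, Bool.false_eq_true, if_false]
      rw [pvRound]
      -- the dict accumulator of the round
      have hdict : ((pvCombR items i).map pvProj).foldl
          (fun d e => d.insert (PySem.Str.lstrip e.1) (PySem.Str.lstrip e.2.1)) out =
          pvInsA out ((PySem.List.combinations items i).map pvPairB) := by
        rw [← pvCombR_fst]
        simp only [pvInsA, List.foldl_map, pvProj, pvPairB]
      -- the next level of the round
      have hnext : ((pvCombR items i).map pvProj).foldl
          (fun l e => l ++ (PySem.List.enumerate e.2.2 0).map (fun te =>
            (e.1 ++ " " ++ te.2.1, e.2.1 ++ " " ++ te.2.2,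
             PySem.List.slice e.2.2 (some (te.1 + 1)) none))) [] =
          (pvCombR items (i + 1)).map pvProj := by
        rw [PySem.List.foldl_append_eq_flatMap, List.nil_append, List.flatMap_map]
        rw [pvCombR_succ, List.map_flatMap]
        apply List.flatMap_congr
        intro p hp
        simp only [pvProj]
        rw [pvChild_map, List.map_map]
        apply List.map_congr_left
        intro q _
        have hlen : p.1.length = i := pvCombR_length hp
        have hne1 : p.1.map (·.1) ≠ [] := by
          simp only [ne_eq, List.map_eq_nil_iff]; intro hh; rw [hh] at hlen; simp at hlen; omega
        have hne2 : p.1.map (·.2) ≠ [] := by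
          simp only [ne_eq, List.map_eq_nil_iff]; intro hh; rw [hh] at hlen; simp at hlen; omega
        simp only [Function.comp_def, pvProj, List.map_append, List.map_cons, List.map_nil]
        rw [pvJ_append_singleton _ hne1, pvJ_append_singleton _ hne2]
      rw [hdict, hnext, ih (i + 1) _ (by omega) (by omega)]
      rw [← pvInsA_append]
      congr 1
      rw [List.range_succ_eq_map]
      simp only [List.flatMap_cons, List.flatMap_map, Nat.add_zero, Nat.succ_eq_add_one]
      congr 1
      apply List.flatMap_congr
      intro t _
      have harith : i + (t + 1) = i + 1 + t := by omega
      rw [harith]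

-- the seed level of B is the size-1 layer
theorem pvSeed (items : List (String × String)) :
    (PySem.List.enumerate items 0).map (fun je =>
        (je.2.1, je.2.2, PySem.List.slice items (some (je.1 + 1)) none)) =
      (pvCombR items 1).map pvProj := by
  rw [pvSeed_map, pvCombR_one, List.map_map]
  apply List.map_congr_left
  intro q _
  simp [pvProj, pvJ_singleton]

-- A's per-combination accumulator splits into its two string folds
theorem pvAPair_split (d : PySem.Dict String String) (c : List String) :
    ∀ (a b : String),
      c.foldl (fun (acc : String × String) x =>
          (acc.1 ++ " " ++ x, acc.2 ++ " " ++ d.getD x "")) (a, b) =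
      (c.foldl (fun acc x => acc ++ " " ++ x) a,
       c.foldl (fun acc x => acc ++ " " ++ d.getD x "") b) := by
  induction c with
  | nil => intro a b; rfl
  | cons x t ih => intro a b; simp only [List.foldl_cons]; exact ih _ _

-- A's per-combination pair is (" " ++ join keys, " " ++ join values)
theorem pvA_pair (d : PySem.Dict String String) (hd : d.keys.Nodup)
    (c : List (String × String)) (hc : c ≠ []) (hmem : ∀ p ∈ c, p ∈ d.items) :
    (c.map (·.1)).foldl
        (fun (acc : String × String) x => (acc.1 ++ " " ++ x, acc.2 ++ " " ++ d.getD x ""))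
        ("", "") =
      (" " ++ pvJ (c.map (·.1)), " " ++ pvJ (c.map (·.2))) := by
  rw [pvAPair_split]
  have hcne : c.map (·.1) ≠ [] := by simpa using hc
  simp only [Prod.mk.injEq]
  constructor
  · rw [pvFoldl_join _ hcne]
    simp
  · rw [List.foldl_map]
    have hvals : c.foldl (fun (a : String) p => a ++ " " ++ d.getD p.1 "") "" =
        c.foldl (fun (a : String) p => a ++ " " ++ p.2) "" := by
      apply PySem.List.foldl_congr_mem
      intro a p hp
      rw [PySem.Dict.getD_of_mem_items d (hmem p hp) hd]
    rw [hvals, ← List.foldl_map (f := fun p : String × String => p.2)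
      (g := fun (a : String) (x : String) => a ++ " " ++ x)]
    rw [pvFoldl_join _ (by simpa using hc)]
    simp

-- ===== VERDICT (by name: the statement is the Claim_ definition above) =====
theorem generate_label_set_map_spec : Claim_equal_generate_label_set_map := by
  intro label_map _
  unfold Spec_generate_label_set_map generate_label_set_map generate_label_set_map_alt
  dsimp only []
  set d := PySem.Dict.ofList label_map with hdd
  have hd : d.keys.Nodup := PySem.Dict.nodup_keys_ofList label_map
  set items := d.items with hitems
  -- B side
  rw [pvSeed items]
  rw [pvAltLoop_eq items items.length 1 PySem.Dict.empty (le_refl 1) (by omega)]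
  -- A side
  have hsize : d.size = items.length := rfl
  have hkeys : d.keys = items.map (·.1) := rfl
  rw [hsize, hkeys]
  have hrange : PySem.List.pyRange 1 ((items.length : Int) + 1) 1 =
      (List.range items.length).map (fun k : Nat => (1 : Int) + (k : Int)) := by
    rw [PySem.List.pyRange_one]
    have h1 : (((items.length : Int) + 1) - 1).toNat = items.length := by omega
    rw [h1]
  rw [hrange, List.foldl_map]
  have hA : ∀ (k : Nat) (sm : PySem.Dict String String),
      (PySem.List.combinations (items.map (·.1)) ((1 : Int) + k).toNat).foldl
        (fun sm comb =>
          let kv := comb.foldl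
            (fun (acc : String × String) x => (acc.1 ++ " " ++ x, acc.2 ++ " " ++ d.getD x ""))
            ("", "")
          sm.insert (PySem.Str.lstrip kv.1) (PySem.Str.lstrip kv.2)) sm =
      pvInsA sm ((PySem.List.combinations items (1 + k)).map pvPairB) := by
    intro k sm
    have hnat : ((1 : Int) + k).toNat = 1 + k := by omega
    rw [hnat, PySem.List.combinations_map, List.foldl_map]
    rw [pvInsA, List.foldl_map]
    apply PySem.List.foldl_congr_mem
    intro acc c hcmem
    have hcne : c ≠ [] := by
      intro hnil
      have := ((PySem.List.mem_combinations_iff _ _ _).1 hcmem).2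
      rw [hnil] at this; simp at this; omega
    have hmem : ∀ p ∈ c, p ∈ items := fun p hp => pvMem_combinations_mem hcmem hp
    show (let kv := (c.map (·.1)).foldl
            (fun (acc : String × String) x => (acc.1 ++ " " ++ x, acc.2 ++ " " ++ d.getD x ""))
            ("", "")
          acc.insert (PySem.Str.lstrip kv.1) (PySem.Str.lstrip kv.2)) =
        acc.insert (pvPairB c).1 (pvPairB c).2
    simp only [pvA_pair d hd c hcne hmem, pvPairB]
    rw [pvLstrip_space, pvLstrip_space]
  have houter : (List.range items.length).foldl
      (fun sm (k : Nat) =>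
        (PySem.List.combinations (items.map (·.1)) ((1 : Int) + (k : Int)).toNat).foldl
          (fun sm comb =>
            let kv := comb.foldl
              (fun (acc : String × String) x => (acc.1 ++ " " ++ x, acc.2 ++ " " ++ d.getD x ""))
              ("", "")
            sm.insert (PySem.Str.lstrip kv.1) (PySem.Str.lstrip kv.2)) sm)
      PySem.Dict.empty =
      (List.range items.length).foldl
        (fun sm k => pvInsA sm ((PySem.List.combinations items (1 + k)).map pvPairB))
        PySem.Dict.empty := by
    apply PySem.List.foldl_congr_mem
    intro acc k _
    exact hA k acc
  rw [houter]
  congr 1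
  simp only [pvInsA]
  rw [← List.foldl_flatMap]
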